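-- pv_equiv track=rewrite | github.com/InformaticsGenomicMedicine/FHIR-MolDef-python | src/utils/allele_profile_factory.py | _detect_sequence_type
-- ===== SOURCE A (Python) =====
-- def _detect_sequence_type(sequence_id: str) -> str:
--     """Translate the prefix of the RefSeq identifier to the type of sequence.
--
--     Args:
--         sequence_id (str): The RefSeq identifier.
--
--     Raises:
--         ValueError: If the prefix doesn't match any known sequence type.
--
--     Returns:
--         str: The type of sequence
--     """
--     prefix_to_type = {
--         "NC_": "DNA",
--         "NM_": "DNA",
--         "NG_": "DNA",
--         "NR_": "RNA",
--         "NP_": "protein",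
--     }
--
--     for prefix, seq_type in prefix_to_type.items():
--         if sequence_id.startswith(prefix):
--             return seq_type
--
--     raise ValueError(f"Unknown sequence type for input: {sequence_id}")
-- ===== SOURCE B (Python) =====
-- def _detect_sequence_type(sequence_id: str) -> str:
--     # Character decision tree: every known prefix is 'N' + class-char + '_',
--     # so inspect the three positions directly instead of consulting a table.
--     if len(sequence_id) >= 3 and sequence_id[0] == "N" and sequence_id[2] == "_":
--         c = sequence_id[1]
--         if c in "CMG":
--             return "DNA"
--         if c == "R":
--             return "RNA"
--         if c == "P":
--             return "protein"
--     raise ValueError(f"Unknown sequence type for input: {sequence_id}")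
-- ===== Notes on version B (the rewrite author's own statement) =====
-- stated objective: alternative
-- what changed: Replaces the table of prefixes scanned with startswith by a table-free character decision tree: check positions 0 and 2 for 'N' and '_' once, then branch on the single middle character to pick DNA/RNA/protein; correct because all five known prefixes share the shape N?_ and differ only in the middle character.
import Mathlib
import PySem

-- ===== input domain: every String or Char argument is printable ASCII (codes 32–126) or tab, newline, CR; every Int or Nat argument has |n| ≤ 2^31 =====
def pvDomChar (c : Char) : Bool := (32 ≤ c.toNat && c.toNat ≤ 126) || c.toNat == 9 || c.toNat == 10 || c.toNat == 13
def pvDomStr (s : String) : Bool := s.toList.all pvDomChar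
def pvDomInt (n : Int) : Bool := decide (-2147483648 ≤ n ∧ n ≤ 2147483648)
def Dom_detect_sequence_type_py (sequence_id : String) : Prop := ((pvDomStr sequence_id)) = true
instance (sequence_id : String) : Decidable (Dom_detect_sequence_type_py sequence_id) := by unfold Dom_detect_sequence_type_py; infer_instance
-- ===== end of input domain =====

-- B replaces A's prefix-table scan with a table-free character decision tree (positions 0,2 fixed, branch on position 1): alternative decomposition.


-- ===== PORT A =====
-- the dict literal of A, as an insertion-ordered association list
def pvPrefixToType : List (String × String) :=
  [("NC_", "DNA"), ("NM_", "DNA"), ("NG_", "DNA"), ("NR_", "RNA"), ("NP_", "protein")]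

-- A's 'for prefix, seq_type in prefix_to_type.items(): if startswith: return' loop;
-- the fall-through 'raise ValueError' returns none (those inputs are excluded by Pre_)
def pvScan (sequence_id : String) : List (String × String) → Option String
  | [] => none
  | (p, t) :: rest =>
      if PySem.Str.startswith sequence_id p then some t else pvScan sequence_id rest

def detect_sequence_type_py (sequence_id : String) : String :=
  (pvScan sequence_id pvPrefixToType).getD ""

-- ===== PORT B =====
-- B's character decision tree; the 'raise ValueError' fall-through returns "" (excluded by Pre_)
def detect_sequence_type_py_alt (sequence_id : String) : String :=
  if 3 ≤ PySem.Str.len sequence_id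
      ∧ PySem.Str.pyGet? sequence_id 0 = some 'N'
      ∧ PySem.Str.pyGet? sequence_id 2 = some '_' then
    match PySem.Str.pyGet? sequence_id 1 with
    | some c =>
        if c = 'C' ∨ c = 'M' ∨ c = 'G' then "DNA"
        else if c = 'R' then "RNA"
        else if c = 'P' then "protein"
        else ""
    | none => ""
  else ""

-- ===== PRECONDITION & SPEC =====
-- Pre_ excludes exactly the inputs on which A raises ValueError (no known prefix); B raises the same ValueError there.
def Pre_detect_sequence_type_py (sequence_id : String) : Prop :=
  (pvPrefixToType.any (fun pt => PySem.Str.startswith sequence_id pt.1)) = true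
instance (sequence_id : String) : Decidable (Pre_detect_sequence_type_py sequence_id) := by
  unfold Pre_detect_sequence_type_py; infer_instance

def pvWitness_detect_sequence_type_py : String := "NM_000551.4"

def Spec_detect_sequence_type_py (sequence_id : String) (out : String) : Prop := out = detect_sequence_type_py_alt sequence_id
instance (sequence_id : String) (out : String) : Decidable (Spec_detect_sequence_type_py sequence_id out) := by unfold Spec_detect_sequence_type_py; infer_instance

-- ===== CLAIM =====
def Claim_equal_detect_sequence_type_py : Prop := ∀ (sequence_id : String), Dom_detect_sequence_type_py sequence_id → Pre_detect_sequence_type_py sequence_id → Spec_detect_sequence_type_py sequence_id (detect_sequence_type_py sequence_id)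

-- ===== LEMMAS AND PROOFS =====

set_option maxHeartbeats 2000000 in
theorem detect_sequence_type_py_spec : Claim_equal_detect_sequence_type_py := by
  intro s _hdom hpre
  show detect_sequence_type_py s = detect_sequence_type_py_alt s
  obtain ⟨l, rfl⟩ : ∃ l, s = String.ofList l := ⟨s.toList, String.ofList_toList.symm⟩
  unfold Pre_detect_sequence_type_py pvPrefixToType at hpre
  simp only [detect_sequence_type_py, detect_sequence_type_py_alt, pvScan, pvPrefixToType,
    List.any_cons, List.any_nil] at hpre ⊢
  rw [show ("NC_" : String) = String.ofList ['N','C','_'] from rfl,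
      show ("NM_" : String) = String.ofList ['N','M','_'] from rfl,
      show ("NG_" : String) = String.ofList ['N','G','_'] from rfl,
      show ("NR_" : String) = String.ofList ['N','R','_'] from rfl,
      show ("NP_" : String) = String.ofList ['N','P','_'] from rfl] at hpre ⊢
  simp only [PySem.Str.startswith_eq, PySem.Str.len_eq, PySem.Str.pyGet?_eq,
    PySem.Chars.pyGet?_eq_listPyGet?, String.toList_ofList, PySem.Chars.startswith] at hpre ⊢
  rcases l with _ | ⟨x, _ | ⟨y, _ | ⟨z, rest⟩⟩⟩ <;>
    simp only [List.isPrefixOf, Bool.and_eq_true, beq_iff_eq,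
      Bool.or_eq_true, Bool.false_eq_true, or_false] at hpre ⊢
  all_goals
    rcases hpre with ⟨h1, h2, h3, -⟩ | ⟨h1, h2, h3, -⟩ | ⟨h1, h2, h3, -⟩ | ⟨h1, h2, h3, -⟩ | ⟨h1, h2, h3, -⟩ <;>
      subst h1 <;> subst h2 <;> subst h3 <;>
      simp [PySem.List.pyGet?, PySem.List.pyIdx?] <;>
      split_ifs <;> simp_all <;> omega
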